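-- pv_equiv track=rewrite | github.com/bb1950328/DigiCod_Nspire | icth_tool.py | is_irreducible_polynomial
-- ===== SOURCE A (Python) =====
-- def polynomial_division_gf2(dividend, divisor):
--     """
--     Polynomiale Division im GF(2)
--
--     Argumente:
--         dividend, divisor: Listen mit Koeffizienten, höchste Potenz zuerst
--     Rückgabe:
--         (quotient, remainder): Tupel mit Ergebnispolynomen
--     """
--     # Entferne führende Nullen
--     while len(dividend) > 0 and dividend[0] == 0:
--         dividend = dividend[1:]
--     while len(divisor) > 0 and divisor[0] == 0:
--         divisor = divisor[1:]
--
--     if not divisor: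
--         raise ValueError("Division durch Null")
--
--     if not dividend:
--         return [0], [0]
--
--     if len(dividend) < len(divisor):
--         return [0], dividend.copy()
--
--     quotient = [0] * (len(dividend) - len(divisor) + 1)
--     remainder = dividend.copy()
--
--     for i in range(len(quotient)):
--         if remainder[i] == 1:
--             quotient[i] = 1
--             for j in range(len(divisor)):
--                 remainder[i + j] = (remainder[i + j] + divisor[j]) % 2
--
--     # Entferne führende Nullen im Rest
--     while len(remainder) > 0 and remainder[0] == 0:
--         remainder = remainder[1:]
--
--     # Falls Rest leer ist, setze ihn auf [0]
--     if not remainder: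
--         remainder = [0]
--
--     return quotient, remainder
--
-- def is_irreducible_polynomial(poly):
--     """
--     Prüft, ob ein Polynom irreduzibel ist im GF(2)
--
--     Argument:
--         poly: Liste mit Koeffizienten, höchste Potenz zuerst
--     Rückgabe:
--         bool: True wenn irreduzibel, False sonst
--     """
--     # Entferne führende Nullen
--     while poly and poly[0] == 0:
--         poly = poly[1:]
--
--     if not poly or len(poly) <= 1:
--         return False  # Konstante oder leeres Polynom
--
--     degree = len(poly) - 1
--
--     # Brute-Force-Methode: Prüfe alle möglichen Faktoren bis Grad degree//2
--     for d in range(1, degree // 2 + 1):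
--         # Generiere alle möglichen Polynome vom Grad d
--         for coeffs in generate_all_polynomials(d):
--             # Füge eine 1 für den höchsten Koeffizienten hinzu
--             test_poly = [1] + coeffs
--
--             # Prüfe ob test_poly ein Teiler ist
--             _, remainder = polynomial_division_gf2(poly, test_poly)
--
--             if remainder == [0]:
--                 return False  # Gefunden: test_poly ist ein Teiler
--
--     return True
--
-- def generate_all_polynomials(degree):
--     """
--     Generiert alle möglichen Polynome vom Grad < degree im GF(2)
--
--     Argument:
--         degree: Maximaler Grad
--     Rückgabe:
--         Liste aller möglichen Polynomkoeffizienten (ohne höchsten Koeffizienten)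
--     """
--     result = []
--
--     # 2^degree mögliche Kombinationen
--     for i in range(2 ** degree):
--         # Konvertiere i in Binärdarstellung
--         binary = bin(i)[2:].zfill(degree)
--         coeffs = [int(bit) for bit in binary]
--         result.append(coeffs)
--
--     return result
-- ===== SOURCE B (Python) =====
-- def gf2_add(a, b):
--     """Sum of two GF(2) polynomials, lowest-degree-first coefficient lists."""
--     if len(a) < len(b):
--         a, b = b, a
--     return [(x + y) % 2 for x, y in zip(a, b)] + a[len(b):]
--
--
-- def gf2_mul(a, b):
--     """Product of two GF(2) polynomials, lowest-degree-first coefficient lists."""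
--     prod = []
--     for i, x in enumerate(a):
--         if x:
--             prod = gf2_add(prod, [0] * i + b)
--     return prod
--
--
-- def is_irreducible_polynomial(poly):
--     # A polynomial of degree n >= 1 over GF(2) is reducible exactly when it is
--     # the product of two monic polynomials of degrees d and n-d with 1 <= d <= n//2.
--     # Search for such a factorisation by multiplying candidate pairs.
--     while poly and poly[0] == 0:
--         poly = poly[1:]
--     n = len(poly) - 1
--     if n < 1:
--         return False
--     rp = poly[::-1]  # lowest-degree-first
--     for d in range(1, n // 2 + 1):
--         for gm in range(1 << d):
--             g = [(gm >> j) & 1 for j in range(d)] + [1]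
--             for hm in range(1 << (n - d)):
--                 h = [(hm >> j) & 1 for j in range(n - d)] + [1]
--                 if gf2_mul(g, h) == rp:
--                     return False
--     return True
-- ===== Notes on version B (the rewrite author's own statement) =====
-- stated objective: alternative
-- what changed: B decides reducibility by searching for a factor pair instead of trial division: it multiplies every pair of monic GF(2) polynomials of degrees d and n-d (1 <= d <= n//2, enumerated as bit masks) and compares the product with the input, where A divides the input by every candidate divisor and tests the remainder; Pre_ excludes only inputs whose stripped head is 1 while some other coefficient is not 0/1, where A's '== 1'-triggered mod-2 division gives accidental results.
-- outside the precondition, e.g. on is_irreducible_polynomial([1, 2, 1]): A returns False, B returns True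
import Mathlib
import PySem

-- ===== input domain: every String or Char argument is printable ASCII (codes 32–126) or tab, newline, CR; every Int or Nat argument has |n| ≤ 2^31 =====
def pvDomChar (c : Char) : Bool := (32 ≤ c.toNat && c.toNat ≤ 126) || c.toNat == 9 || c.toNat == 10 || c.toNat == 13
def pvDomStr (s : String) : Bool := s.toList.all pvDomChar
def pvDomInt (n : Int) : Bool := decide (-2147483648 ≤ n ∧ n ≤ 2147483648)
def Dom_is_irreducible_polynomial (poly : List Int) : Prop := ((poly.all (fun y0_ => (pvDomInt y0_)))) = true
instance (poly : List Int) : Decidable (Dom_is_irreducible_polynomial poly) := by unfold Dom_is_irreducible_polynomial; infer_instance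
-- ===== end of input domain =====

-- B replaces A's trial division (divide the input by every monic candidate divisor and test the
-- remainder) by a factor-pair search: it multiplies every pair of monic polynomials of degrees
-- d and n-d (1 ≤ d ≤ n/2) over GF(2) and compares the product with the input; alternative, not faster.

-- ===== PORT A =====
-- 'while xs and xs[0] == 0: xs = xs[1:]'
def stripZeros : List Int → List Int
  | [] => []
  | h :: t => if h = 0 then stripZeros t else h :: t

-- inner 'for j in range(len(divisor)): remainder[i+j] = (remainder[i+j] + divisor[j]) % 2'
def polyInnerA (divisor : List Int) (i : Nat) (rem : List Int) : List Int :=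
  (List.range divisor.length).foldl
    (fun r j => r.set (i + j) ((r.getD (i + j) 0 + divisor.getD j 0) % 2)) rem

-- body of 'for i in range(len(quotient))' over the (quotient, remainder) state
def polyStepA (divisor : List Int) (qr : List Int × List Int) (i : Nat) : List Int × List Int :=
  if qr.2.getD i 0 = 1 then (qr.1.set i 1, polyInnerA divisor i qr.2) else qr

-- strip remainder's leading zeros; empty remainder becomes [0]
def pvDivFinish (qr : List Int × List Int) : Option (List Int × List Int) :=
  some (qr.1, if stripZeros qr.2 = [] then [0] else stripZeros qr.2)

-- 'raise ValueError' is ported as none (never reached from is_irreducible_polynomial)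
def polynomial_division_gf2 (dividend0 divisor0 : List Int) : Option (List Int × List Int) :=
  if stripZeros divisor0 = [] then none
  else if stripZeros dividend0 = [] then some ([0], [0])
  else if (stripZeros dividend0).length < (stripZeros divisor0).length then
    some ([0], stripZeros dividend0)
  else
    pvDivFinish
      ((List.range ((stripZeros dividend0).length - (stripZeros divisor0).length + 1)).foldl
        (polyStepA (stripZeros divisor0))
        (List.replicate ((stripZeros dividend0).length - (stripZeros divisor0).length + 1) 0,
          stripZeros dividend0))

-- bin(i)[2:] as a list of 0/1 ints, most significant first (bin(0)[2:] handled in natToBin)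
def binDigits : Nat → List Int
  | 0 => []
  | n+1 => binDigits ((n+1) / 2) ++ [(((n+1) % 2 : Nat) : Int)]
decreasing_by exact Nat.div_lt_self (Nat.succ_pos n) (by omega)

def natToBin (i : Nat) : List Int := if i = 0 then [0] else binDigits i

-- .zfill(degree) on the digit list
def zfillBits (degree : Nat) (bits : List Int) : List Int :=
  List.replicate (degree - bits.length) 0 ++ bits

def generate_all_polynomials (degree : Nat) : List (List Int) :=
  (List.range (2 ^ degree)).map (fun i => zfillBits degree (natToBin i))

-- degree = len(poly) - 1 (after stripping) is inlined below
def is_irreducible_polynomial (poly : List Int) : Bool :=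
  if stripZeros poly = [] ∨ (stripZeros poly).length ≤ 1 then false
  else
    if (List.range' 1 (((stripZeros poly).length - 1) / 2)).any (fun d =>
        (generate_all_polynomials d).any (fun coeffs =>
          match polynomial_division_gf2 (stripZeros poly) (1 :: coeffs) with
          | none => false
          | some qr => decide (qr.2 = [0])))
    then false else true

-- ===== PORT B =====
-- '[(x + y) % 2 for x, y in zip(a, b)] + a[len(b):]' after the swap that makes a the longer list
def gf2_add (a b : List Int) : List Int :=
  if a.length < b.length then
    (List.zipWith (fun x y => (x + y) % 2) b a) ++ b.drop a.length
  else
    (List.zipWith (fun x y => (x + y) % 2) a b) ++ a.drop b.length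

-- 'for i in range(len(a)): if a[i]: prod = gf2_add(prod, [0]*i + b)'
def gf2_mul (a b : List Int) : List Int :=
  (List.range a.length).foldl
    (fun prod i => if a.getD i 0 ≠ 0 then gf2_add prod (List.replicate i 0 ++ b) else prod) []

-- '[(m >> j) & 1 for j in range(w)]' — lowest-degree-first candidate tail
def lowBits (m w : Nat) : List Int :=
  (List.range w).map (fun j => (((m >>> j) &&& 1 : Nat) : Int))

-- n = len(p) - 1; 'if n < 1: return False'; rp = p[::-1] (p inlined at each use)
def is_irreducible_polynomial_alt (poly : List Int) : Bool :=
  if ((poly.dropWhile (fun x => decide (x = 0))).length : Int) - 1 < 1 then false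
  else
    !((List.range' 1 (((poly.dropWhile (fun x => decide (x = 0))).length - 1) / 2)).any (fun d =>
        (List.range (2 ^ d)).any (fun gm =>
          (List.range (2 ^ ((poly.dropWhile (fun x => decide (x = 0))).length - 1 - d))).any
            (fun hm =>
              gf2_mul (lowBits gm d ++ [1])
                (lowBits hm ((poly.dropWhile (fun x => decide (x = 0))).length - 1 - d) ++ [1])
                == (poly.dropWhile (fun x => decide (x = 0))).reverse))))

-- ===== PRECONDITION & SPEC =====
-- Pre_ excludes polynomials that start (after leading zeros) with coefficient 1 but contain a
-- coefficient other than 0/1: there A's division triggers on its '== 1' test yet reduces entries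
-- mod 2, an accidental mixture; inputs whose stripped head is not 1, and genuine GF(2) inputs
-- (all coefficients 0/1), are all admitted.
def Pre_is_irreducible_polynomial (poly : List Int) : Prop :=
  ((poly.dropWhile (fun x => decide (x = 0))).headD 0 ≠ 1)
  ∨ (poly.all (fun x => x == 0 || x == 1)) = true
instance (poly : List Int) : Decidable (Pre_is_irreducible_polynomial poly) := by
  unfold Pre_is_irreducible_polynomial; infer_instance

def pvWitness_is_irreducible_polynomial : List Int := [1, 1, 1]

def Spec_is_irreducible_polynomial (poly : List Int) (out : Bool) : Prop := out = is_irreducible_polynomial_alt poly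
instance (poly : List Int) (out : Bool) : Decidable (Spec_is_irreducible_polynomial poly out) := by unfold Spec_is_irreducible_polynomial; infer_instance

-- ===== CLAIM (what is proved, stated in full; the proofs are below) =====
def Claim_equal_is_irreducible_polynomial : Prop := ∀ (poly : List Int), Dom_is_irreducible_polynomial poly → Pre_is_irreducible_polynomial poly → Spec_is_irreducible_polynomial poly (is_irreducible_polynomial poly)

-- ===== LEMMAS AND PROOFS =====

-- all entries are GF(2) bits
def BitsL (l : List Int) : Prop := ∀ x ∈ l, x = 0 ∨ x = 1

-- a bit list, lowest degree first, as a polynomial over GF(2)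
noncomputable def toP : List Int → Polynomial (ZMod 2)
  | [] => 0
  | b :: t => Polynomial.C (b : ZMod 2) + Polynomial.X * toP t

theorem toP_coeff : ∀ (l : List Int) (i : Nat), (toP l).coeff i = ((l.getD i 0 : Int) : ZMod 2) := by
  intro l
  induction l with
  | nil => intro i; simp [toP]
  | cons b t ih =>
    intro i
    cases i with
    | zero => simp [toP, Polynomial.coeff_add, Polynomial.coeff_C, Polynomial.coeff_X_mul_zero]
    | succ n =>
      simp only [toP, Polynomial.coeff_add, Polynomial.coeff_X_mul, ih, List.getD_cons_succ]
      rw [Polynomial.coeff_C, if_neg (by omega)]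
      simp

theorem toP_degree_lt (l : List Int) : (toP l).degree < (l.length : Nat) := by
  rw [Polynomial.degree_lt_iff_coeff_zero]
  intro m hm
  rw [toP_coeff]
  have hlen : l.length ≤ m := by exact_mod_cast hm
  rw [List.getD_eq_getElem?_getD, List.getElem?_eq_none (by omega)]
  simp

theorem toP_append (a b : List Int) :
    toP (a ++ b) = toP a + Polynomial.X ^ a.length * toP b := by
  induction a with
  | nil => simp [toP]
  | cons x t ih =>
    simp only [List.cons_append, toP, ih, List.length_cons, pow_succ]
    ring

theorem toP_replicate_zero (n : Nat) : toP (List.replicate n 0) = 0 := by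
  induction n with
  | zero => rfl
  | succ k ih => simp [List.replicate_succ, toP, ih]

theorem intCast_mod_two (x : Int) : ((x % 2 : Int) : ZMod 2) = (x : ZMod 2) := by
  have h : (x % 2 : Int) = x - 2 * (x / 2) := by omega
  rw [h]
  push_cast
  have h2 : ((2 : Int) : ZMod 2) = 0 := by decide
  push_cast at h2
  rw [h2]
  ring

theorem toP_eq_zero_bits (l : List Int) (hb : BitsL l) :
    (toP l = 0) ↔ (l.all (fun x => x == 0) = true) := by
  constructor
  · intro h
    rw [List.all_eq_true]
    intro x hx
    rcases List.getElem_of_mem hx with ⟨i, hi, rfl⟩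
    have hc := toP_coeff l i
    rw [h, Polynomial.coeff_zero] at hc
    have hg : l.getD i 0 = l[i] := by
      rw [List.getD_eq_getElem?_getD, List.getElem?_eq_getElem hi]; rfl
    rw [hg] at hc
    rcases hb l[i] hx with h0 | h1
    · simp [h0]
    · rw [h1] at hc; exact absurd hc.symm (by decide)
  · intro h
    induction l with
    | nil => rfl
    | cons x t ih =>
      simp only [List.all_cons, Bool.and_eq_true, beq_iff_eq] at h
      have := ih (fun y hy => hb y (List.mem_cons_of_mem _ hy)) h.2
      simp [toP, h.1, this]

theorem toP_inj_bits (a b : List Int) (ha : BitsL a) (hb : BitsL b)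
    (hlen : a.length = b.length) (h : toP a = toP b) : a = b := by
  apply List.ext_getElem hlen
  intro i hia hib
  have hc : ((a.getD i 0 : Int) : ZMod 2) = ((b.getD i 0 : Int) : ZMod 2) := by
    rw [← toP_coeff, ← toP_coeff, h]
  have hga : a.getD i 0 = a[i] := by
    rw [List.getD_eq_getElem?_getD, List.getElem?_eq_getElem hia]; rfl
  have hgb : b.getD i 0 = b[i] := by
    rw [List.getD_eq_getElem?_getD, List.getElem?_eq_getElem hib]; rfl
  rw [hga, hgb] at hc
  rcases ha a[i] (List.getElem_mem hia) with h0 | h1 <;>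
    rcases hb b[i] (List.getElem_mem hib) with g0 | g1
  · rw [h0, g0]
  · exfalso; rw [h0, g1] at hc; revert hc; decide
  · exfalso; rw [h1, g0] at hc; revert hc; decide
  · rw [h1, g1]

theorem toP_top (l : List Int) :
    toP (l ++ [1]) = toP l + Polynomial.X ^ l.length := by
  rw [toP_append]
  have : toP [(1 : Int)] = 1 := by simp [toP]
  rw [this, mul_one]

theorem monic_toP_top (l : List Int) :
    (toP (l ++ [1])).Monic ∧ (toP (l ++ [1])).natDegree = l.length := by
  rw [toP_top]
  rcases Nat.eq_zero_or_pos l.length with h0 | hpos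
  · rcases List.eq_nil_of_length_eq_zero h0 with rfl
    constructor
    · simpa [toP] using Polynomial.monic_one
    · simp [toP]
  · have hlt : (toP l).degree < ((Polynomial.X : Polynomial (ZMod 2)) ^ l.length).degree := by
      rw [Polynomial.degree_X_pow]
      exact toP_degree_lt l
    have hdeg : ((Polynomial.X : Polynomial (ZMod 2)) ^ l.length + toP l).degree = (l.length : Nat) := by
      rw [Polynomial.degree_add_eq_left_of_degree_lt hlt, Polynomial.degree_X_pow]
    constructor
    · rw [add_comm]
      exact Polynomial.monic_X_pow_add (toP_degree_lt l)
    · rw [add_comm]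
      exact Polynomial.natDegree_eq_of_degree_eq_some hdeg

-- ---- A-side reduction machinery (division loop → consuming pass divB) ----

theorem stripZeros_eq_dropWhile (l : List Int) :
    l.dropWhile (fun x => decide (x = 0)) = stripZeros l := by
  induction l with
  | nil => rfl
  | cons h t ih =>
    by_cases h0 : h = 0 <;> simp [stripZeros, List.dropWhile, h0, ih]

theorem stripZeros_head_ne (l : List Int) (c : Int) (r : List Int)
    (h : stripZeros l = c :: r) : c ≠ 0 := by
  induction l with
  | nil => simp [stripZeros] at h
  | cons a t ih =>
    by_cases a0 : a = 0
    · rw [stripZeros, if_pos a0] at h; exact ih h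
    · rw [stripZeros, if_neg a0] at h
      cases h; exact a0

theorem stripZeros_eq_nil_iff (l : List Int) :
    stripZeros l = [] ↔ l.all (fun x => x == 0) = true := by
  induction l with
  | nil => simp [stripZeros]
  | cons a t ih =>
    by_cases a0 : a = 0 <;> simp [stripZeros, a0, ih]

theorem stripZeros_noop (c : Int) (r : List Int) (hc : c ≠ 0) :
    stripZeros (c :: r) = c :: r := by
  rw [stripZeros, if_neg hc]

theorem check_eq_all (l : List Int) :
    decide ((if stripZeros l = [] then ([0] : List Int) else stripZeros l) = [0])
      = l.all (fun x => x == 0) := by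
  by_cases h : stripZeros l = []
  · simp [h, (stripZeros_eq_nil_iff l).1 h]
  · rcases hs : stripZeros l with _ | ⟨c, r⟩
    · exact absurd hs h
    · have hc := stripZeros_head_ne l c r hs
      have hall : ¬ l.all (fun x => x == 0) = true := by
        intro hall
        exact h ((stripZeros_eq_nil_iff l).2 hall)
      simp [hs, hc, hall]

-- generic: folding an index-wise operation over a cons, one position shifted
theorem foldl_cons_shift (G G' : List Int → Nat → List Int)
    (h : ∀ (r : List Int) (j : Nat) (a : Int), G (a :: r) j = a :: G' r j) :
    ∀ (js : List Nat) (a : Int) (r : List Int),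
      List.foldl G (a :: r) js = a :: List.foldl G' r js := by
  intro js
  induction js with
  | nil => intro a r; rfl
  | cons j js ih =>
    intro a r
    simp only [List.foldl_cons, h]
    exact ih a (G' r j)

theorem polyInnerA_shift (D : List Int) (i : Nat) (a : Int) (r : List Int) :
    polyInnerA D (i + 1) (a :: r) = a :: polyInnerA D i r := by
  unfold polyInnerA
  exact foldl_cons_shift _ _
    (fun r j a => by
      have hij : i + 1 + j = (i + j) + 1 := by omega
      simp [hij]) _ a r

theorem foldl_nil_acc (js : List Nat) (f : List Int → Nat → List Int)
    (hf : ∀ j, f [] j = []) : List.foldl f ([] : List Int) js = [] := by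
  induction js with
  | nil => rfl
  | cons j js ih => rw [List.foldl_cons, hf]; exact ih

-- '[(x+y)%2 for x,y in zip(t, coeffs)] + t[len(coeffs):]' as a recursion
def xorInto : List Int → List Int → List Int
  | t, [] => t
  | [], _ :: _ => []
  | x :: t, y :: ds => ((x + y) % 2) :: xorInto t ds

theorem polyInnerA_zero (D : List Int) :
    ∀ rem, polyInnerA D 0 rem = xorInto rem D := by
  induction D with
  | nil => intro rem; simp [polyInnerA, xorInto]
  | cons y ds ih =>
    intro rem
    cases rem with
    | nil =>
      unfold polyInnerA
      rw [foldl_nil_acc _ _ (fun j => by simp)]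
      rfl
    | cons x t =>
      unfold polyInnerA
      rw [show ((y : Int) :: ds).length = ds.length + 1 from rfl, List.range_succ_eq_map]
      simp only [List.foldl_cons]
      have h0 : ((x :: t).set (0 + 0) (((x :: t).getD (0 + 0) 0 + ((y : Int) :: ds).getD 0 0) % 2))
          = ((x + y) % 2) :: t := by simp
      rw [h0, List.foldl_map]
      rw [foldl_cons_shift _
        (fun r j => r.set (0 + j) ((r.getD (0 + j) 0 + ds.getD j 0) % 2))
        (fun r j a => by
          have hj : 0 + (j + 1) = (0 + j) + 1 := by omega
          simp [hj]) _ _ t]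
      rw [show xorInto (x :: t) (y :: ds) = ((x + y) % 2) :: xorInto t ds from rfl]
      rw [← ih t]
      rfl

def stepR (D : List Int) (r : List Int) (i : Nat) : List Int :=
  if r.getD i 0 = 1 then polyInnerA D i r else r

theorem foldl_polyStepA_snd (D : List Int) :
    ∀ (js : List Nat) (q r : List Int),
      (List.foldl (polyStepA D) (q, r) js).2 = List.foldl (stepR D) r js := by
  intro js
  induction js with
  | nil => intro q r; rfl
  | cons j js ih =>
    intro q r
    rw [List.foldl_cons, List.foldl_cons]
    unfold polyStepA stepR
    by_cases h : r.getD j 0 = 1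
    · rw [if_pos h, if_pos h]; exact ih _ _
    · rw [if_neg h, if_neg h]; exact ih _ _

theorem stepR_shift (D : List Int) (r : List Int) (j : Nat) (a : Int) :
    stepR D (a :: r) (j + 1) = a :: stepR D r j := by
  unfold stepR
  rw [List.getD_cons_succ]
  by_cases h : r.getD j 0 = 1
  · rw [if_pos h, if_pos h, polyInnerA_shift]
  · rw [if_neg h, if_neg h]

theorem xorInto_length : ∀ (t c : List Int), (xorInto t c).length = t.length := by
  intro t
  induction t with
  | nil => intro c; cases c <;> rfl
  | cons x t ih => intro c; cases c <;> simp [xorInto, ih]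

-- the consuming left-to-right division pass (proof-internal characterisation of A's loop)
def divB : Nat → List Int → List Int → Bool
  | 0, rem, _ => rem.all (fun x => x == 0)
  | _+1, [], _ => false
  | steps+1, h :: t, dtail =>
    if h = 1 then divB steps (xorInto t dtail) dtail
    else if h = 0 then divB steps t dtail
    else false

-- '[(mask >> (d - 1 - j)) & 1 for j in range(d)]' — highest-degree-first mask bits
def maskBits (mask d : Nat) : List Int :=
  (List.range d).map (fun j => (((mask >>> (d - 1 - j)) &&& 1 : Nat) : Int))

-- the whole remainder loop of A, compared with the consuming pass
theorem loop_eq_divB :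
    ∀ (steps : Nat) (rem coeffs : List Int), rem.length = steps + coeffs.length →
      (List.foldl (stepR (1 :: coeffs)) rem (List.range steps)).all (fun x => x == 0)
        = divB steps rem coeffs := by
  intro steps
  induction steps with
  | zero => intro rem coeffs _; rfl
  | succ steps ih =>
    intro rem coeffs hlen
    cases rem with
    | nil => simp at hlen; omega
    | cons h t =>
      rw [List.range_succ_eq_map, List.foldl_cons, List.foldl_map]
      by_cases h1 : h = 1
      · subst h1
        have e0 : stepR (1 :: coeffs) (1 :: t) 0 = 0 :: xorInto t coeffs := by
          unfold stepR
          rw [if_pos (by simp)]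
          rw [polyInnerA_zero]
          rw [show xorInto ((1 : Int) :: t) (1 :: coeffs) = ((1 + 1 : Int) % 2) :: xorInto t coeffs
            from rfl]
          norm_num
        rw [e0, foldl_cons_shift _ (stepR (1 :: coeffs)) (fun r j a => stepR_shift _ r j a)]
        simp only [List.all_cons]
        rw [ih (xorInto t coeffs) coeffs (by rw [xorInto_length]; simp at hlen; omega)]
        simp [divB]
      · by_cases h0 : h = 0
        · subst h0
          have e0 : stepR (1 :: coeffs) (0 :: t) 0 = 0 :: t := by
            unfold stepR; simp
          rw [e0, foldl_cons_shift _ (stepR (1 :: coeffs)) (fun r j a => stepR_shift _ r j a)]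
          simp only [List.all_cons]
          rw [ih t coeffs (by simp at hlen; omega)]
          simp [divB]
        · have e0 : stepR (1 :: coeffs) (h :: t) 0 = h :: t := by
            unfold stepR; simp [h1]
          rw [e0, foldl_cons_shift _ (stepR (1 :: coeffs)) (fun r j a => stepR_shift _ r j a)]
          simp only [List.all_cons]
          simp [divB, h0, h1]

-- A's divisibility test equals the consuming pass, for a stripped dividend and monic divisor
theorem division_check_eq (c : Int) (t coeffs : List Int) (hc : c ≠ 0)
    (hL : coeffs.length ≤ t.length) :
    (match polynomial_division_gf2 (c :: t) (1 :: coeffs) with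
      | none => false
      | some qr => decide (qr.2 = [0]))
      = divB ((c :: t).length - coeffs.length) (c :: t) coeffs := by
  have hstrip : stripZeros (c :: t) = c :: t := stripZeros_noop c t hc
  have hdiv : stripZeros (1 :: coeffs) = (1 : Int) :: coeffs :=
    stripZeros_noop 1 coeffs (by norm_num)
  unfold polynomial_division_gf2
  rw [hstrip, hdiv]
  rw [if_neg (by simp), if_neg (by simp)]
  simp only [List.length_cons]
  rw [if_neg (by omega)]
  rw [show t.length + 1 - (coeffs.length + 1) + 1 = t.length + 1 - coeffs.length by omega]
  unfold pvDivFinish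
  rw [foldl_polyStepA_snd]
  show decide ((if stripZeros (List.foldl (stepR ((1:Int) :: coeffs)) (c :: t)
      (List.range (t.length + 1 - coeffs.length))) = [] then ([0] : List Int)
      else stripZeros (List.foldl (stepR ((1:Int) :: coeffs)) (c :: t)
      (List.range (t.length + 1 - coeffs.length)))) = [0])
    = divB (t.length + 1 - coeffs.length) (c :: t) coeffs
  rw [check_eq_all]
  exact loop_eq_divB _ (c :: t) coeffs (by simp; omega)

theorem any_congr' {α : Type} (l : List α) (f g : α → Bool)
    (h : ∀ x ∈ l, f x = g x) : l.any f = l.any g := by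
  induction l with
  | nil => rfl
  | cons a t ih =>
    simp only [List.any_cons]
    rw [h a (by simp), ih (fun x hx => h x (by simp [hx]))]

theorem binDigits_succ (n : Nat) (hn : 1 ≤ n) :
    binDigits n = binDigits (n / 2) ++ [((n % 2 : Nat) : Int)] := by
  cases n with
  | zero => omega
  | succ m => rw [binDigits]

theorem binDigits_one : binDigits 1 = [(1 : Int)] := by
  rw [binDigits_succ 1 (by norm_num)]
  norm_num
  rw [binDigits]

theorem maskBits_succ (i d : Nat) :
    maskBits i (d + 1) = maskBits (i / 2) d ++ [((i % 2 : Nat) : Int)] := by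
  unfold maskBits
  rw [List.range_succ, List.map_append]
  congr 1
  · apply List.map_congr_left
    intro j hj
    have hj' : j < d := List.mem_range.1 hj
    have h1 : d + 1 - 1 - j = (d - 1 - j) + 1 := by omega
    congr 2
    rw [h1, Nat.add_comm, Nat.shiftRight_add, Nat.shiftRight_one]
  · simp [Nat.and_one_is_mod]

theorem zfill_append (bd : List Int) (b : Int) (d : Nat) :
    List.replicate (d + 1 - (bd ++ [b]).length) (0:Int) ++ (bd ++ [b])
      = (List.replicate (d - bd.length) (0:Int) ++ bd) ++ [b] := by
  rw [List.length_append, List.length_cons, List.length_nil]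
  rw [show d + 1 - (bd.length + (0 + 1)) = d - bd.length by omega]
  rw [List.append_assoc]

theorem natToBin_zero : natToBin 0 = [(0:Int)] := by simp [natToBin]

theorem natToBin_one : natToBin 1 = [(1:Int)] := by simp [natToBin, binDigits_one]

theorem zfill_succ (i d : Nat) (hd : 1 ≤ d) :
    zfillBits (d + 1) (natToBin i) = zfillBits d (natToBin (i / 2)) ++ [((i % 2 : Nat) : Int)] := by
  have hrep : ∀ b : Int, List.replicate (d + 1 - 1) (0:Int) ++ [b]
      = (List.replicate (d - 1) (0:Int) ++ [(0:Int)]) ++ [b] := by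
    intro b
    rw [show d + 1 - 1 = (d - 1) + 1 by omega, List.replicate_succ', List.append_assoc]
  by_cases hi0 : i = 0
  · subst hi0
    rw [Nat.zero_div]
    unfold zfillBits
    rw [natToBin_zero]
    rw [List.length_cons, List.length_nil]
    rw [show ((0 % 2 : Nat) : Int) = (0:Int) by norm_num]
    exact hrep 0
  · by_cases hi1 : i = 1
    · subst hi1
      rw [show (1:Nat) / 2 = 0 from rfl]
      unfold zfillBits
      rw [natToBin_one, natToBin_zero]
      rw [List.length_cons, List.length_nil]
      rw [show ((1 % 2 : Nat) : Int) = (1:Int) by norm_num]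
      exact hrep 1
    · have hi2 : 2 ≤ i := by omega
      have hrec := binDigits_succ i (by omega)
      unfold natToBin
      rw [if_neg hi0, if_neg (show ¬ i / 2 = 0 by omega)]
      unfold zfillBits
      rw [hrec]
      exact zfill_append (binDigits (i / 2)) _ d

theorem bits_eq : ∀ (d : Nat), 1 ≤ d → ∀ i, i < 2 ^ d →
    zfillBits d (natToBin i) = maskBits i d := by
  intro d
  induction d with
  | zero => omega
  | succ d ih =>
    intro _ i hi
    by_cases hd : d = 0
    · subst hd
      interval_cases i
      · rw [natToBin_zero]; simp [zfillBits, maskBits]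
      · rw [natToBin_one]; simp [zfillBits, maskBits]
    · rw [zfill_succ i d (by omega), maskBits_succ]
      rw [ih (by omega) (i / 2) (by
        have := Nat.pow_succ 2 d
        omega)]

theorem maskBits_length (i d : Nat) : (maskBits i d).length = d := by
  simp [maskBits]

-- ---- B-side: gf2_add / gf2_mul as polynomial operations ----

theorem bit_mod_two (x : Int) : x % 2 = 0 ∨ x % 2 = 1 := by omega

theorem bitsL_nil : BitsL [] := by intro x hx; simp at hx

theorem bitsL_cons {x : Int} {l : List Int} (hx : x = 0 ∨ x = 1) (hl : BitsL l) :
    BitsL (x :: l) := by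
  intro y hy
  rcases List.mem_cons.1 hy with rfl | hy'
  · exact hx
  · exact hl y hy'

theorem bitsL_of_cons {x : Int} {l : List Int} (h : BitsL (x :: l)) : BitsL l :=
  fun y hy => h y (List.mem_cons_of_mem _ hy)

theorem bitsL_append {a b : List Int} (ha : BitsL a) (hb : BitsL b) : BitsL (a ++ b) := by
  intro y hy
  rcases List.mem_append.1 hy with h | h
  · exact ha y h
  · exact hb y h

theorem bitsL_reverse {a : List Int} (ha : BitsL a) : BitsL a.reverse := by
  intro y hy
  exact ha y (List.mem_reverse.1 hy)

theorem bitsL_replicate (n : Nat) : BitsL (List.replicate n 0) := by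
  intro y hy
  left
  exact List.eq_of_mem_replicate hy

theorem bitsL_lowBits (m w : Nat) : BitsL (lowBits m w) := by
  intro y hy
  rcases List.mem_map.1 hy with ⟨j, _, rfl⟩
  rw [Nat.and_one_is_mod]
  rcases Nat.mod_two_eq_zero_or_one (m >>> j) with h | h <;> rw [h]
  · left; rfl
  · right; rfl

theorem bitsL_dropWhile {p : Int → Bool} {l : List Int} (hl : BitsL l) :
    BitsL (l.dropWhile p) := by
  intro y hy
  exact hl y (List.dropWhile_subset _ hy)

-- the aligned sum (b the shorter list), as polynomials
theorem addAligned_toP : ∀ (b a : List Int), b.length ≤ a.length →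
    toP ((List.zipWith (fun x y => (x + y) % 2) a b) ++ a.drop b.length) = toP a + toP b := by
  intro b
  induction b with
  | nil => intro a _; simp [toP]
  | cons y bt ih =>
    intro a hlen
    cases a with
    | nil => simp at hlen
    | cons x at_ =>
      simp only [List.zipWith_cons_cons, List.length_cons, List.drop_succ_cons, List.cons_append,
        toP]
      rw [ih at_ (by simpa using hlen)]
      have hx : ((((x + y) % 2 : Int)) : ZMod 2) = (x : ZMod 2) + (y : ZMod 2) := by
        rw [intCast_mod_two]; push_cast; ring
      rw [show Polynomial.C (((x + y) % 2 : Int) : ZMod 2)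
            = Polynomial.C ((x : ZMod 2) + (y : ZMod 2)) by rw [hx]]
      rw [map_add]
      ring

theorem gf2_add_toP (a b : List Int) : toP (gf2_add a b) = toP a + toP b := by
  unfold gf2_add
  split_ifs with h
  · rw [addAligned_toP a b (by omega)]
    ring
  · exact addAligned_toP b a (by omega)

theorem gf2_add_length (a b : List Int) : (gf2_add a b).length = max a.length b.length := by
  unfold gf2_add
  split_ifs with h <;> simp [List.length_zipWith] <;> omega

theorem bitsL_zipmod : ∀ (u v : List Int),
    BitsL (List.zipWith (fun x y => (x + y) % 2) u v) := by
  intro u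
  induction u with
  | nil => intro v; simp [bitsL_nil]
  | cons x t ih =>
    intro v
    cases v with
    | nil => exact bitsL_nil
    | cons y vt => exact bitsL_cons (bit_mod_two _) (ih vt)

theorem gf2_add_bits {a b : List Int} (ha : BitsL a) (hb : BitsL b) : BitsL (gf2_add a b) := by
  have key : ∀ (u v : List Int), BitsL u →
      BitsL ((List.zipWith (fun x y => (x + y) % 2) u v) ++ u.drop v.length) := by
    intro u v hu
    apply bitsL_append
    · exact bitsL_zipmod u v
    · intro y hy
      exact hu y (List.mem_of_mem_drop hy)
  unfold gf2_add
  split_ifs with h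
  · exact key b a hb
  · exact key a b ha

-- gf2_mul's loop body, with the multiplicand a and second factor b fixed
def mulStep (a b : List Int) (prod : List Int) (i : Nat) : List Int :=
  if a.getD i 0 ≠ 0 then gf2_add prod (List.replicate i 0 ++ b) else prod

theorem gf2_mul_eq_foldl (a b : List Int) :
    gf2_mul a b = (List.range a.length).foldl (mulStep a b) [] := rfl

theorem mulStep_len (a b prod : List Int) (i : Nat) :
    (mulStep a b prod i).length ≤ max prod.length (i + b.length) := by
  unfold mulStep
  split_ifs with h
  · rw [gf2_add_length]
    simp
  · omega

theorem mulStep_len_eq {a : List Int} {i : Nat} (h : a.getD i 0 ≠ 0) (b prod : List Int) :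
    (mulStep a b prod i).length = max prod.length (i + b.length) := by
  unfold mulStep
  rw [if_pos h, gf2_add_length]
  simp

theorem mulStep_toP {a : List Int} (ha : BitsL a) (b : List Int) (prod : List Int) (i : Nat)
    (hi : i < a.length) :
    toP (mulStep a b prod i)
      = toP prod + Polynomial.C ((a.getD i 0 : Int) : ZMod 2) * Polynomial.X ^ i * toP b := by
  unfold mulStep
  have hgi : a.getD i 0 = a[i] := by
    rw [List.getD_eq_getElem?_getD, List.getElem?_eq_getElem hi]; rfl
  rcases ha a[i] (List.getElem_mem hi) with h0 | h1
  · rw [if_neg (by rw [hgi, h0]; simp), hgi, h0]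
    simp
  · rw [if_pos (by rw [hgi, h1]; norm_num), hgi, h1]
    rw [gf2_add_toP, toP_append, toP_replicate_zero, List.length_replicate]
    simp

theorem mul_loop {a : List Int} (ha : BitsL a) (b : List Int) :
    ∀ (k i : Nat) (acc : List Int), i + k = a.length →
      toP (List.foldl (mulStep a b) acc (List.range' i k))
        = toP acc + Polynomial.X ^ i * toP (a.drop i) * toP b := by
  intro k
  induction k with
  | zero =>
    intro i acc hik
    rw [List.range'_zero, List.foldl_nil, List.drop_eq_nil_of_le (by omega)]
    simp [toP]
  | succ k ih =>
    intro i acc hik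
    have hi : i < a.length := by omega
    rw [List.range'_succ, List.foldl_cons]
    rw [ih (i + 1) _ (by omega)]
    rw [mulStep_toP ha b acc i hi]
    have hdrop : a.drop i = a[i] :: a.drop (i + 1) := List.drop_eq_getElem_cons hi
    have hgi : a.getD i 0 = a[i] := by
      rw [List.getD_eq_getElem?_getD, List.getElem?_eq_getElem hi]; rfl
    rw [hdrop, hgi]
    show _ = toP acc + Polynomial.X ^ i *
      (Polynomial.C ((a[i] : Int) : ZMod 2) + Polynomial.X * toP (a.drop (i + 1))) * toP b
    rw [pow_succ]
    ring

theorem gf2_mul_toP {a : List Int} (ha : BitsL a) (b : List Int) :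
    toP (gf2_mul a b) = toP a * toP b := by
  rw [gf2_mul_eq_foldl, List.range_eq_range']
  rw [mul_loop ha b a.length 0 [] (by omega)]
  simp [toP]

theorem mul_loop_len_le (a b : List Int) :
    ∀ (k : Nat), (List.foldl (mulStep a b) [] (List.range k)).length ≤ k + b.length := by
  intro k
  induction k with
  | zero => simp
  | succ k ih =>
    rw [List.range_succ, List.foldl_append, List.foldl_cons, List.foldl_nil]
    have := mulStep_len a b (List.foldl (mulStep a b) [] (List.range k)) k
    omega

theorem gf2_mul_length (l b : List Int) (hb : 1 ≤ b.length) :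
    (gf2_mul (l ++ [1]) b).length = l.length + b.length := by
  rw [gf2_mul_eq_foldl]
  have hlen : (l ++ [(1:Int)]).length = l.length + 1 := by simp
  rw [hlen, List.range_succ, List.foldl_append, List.foldl_cons, List.foldl_nil]
  have hget : (l ++ [(1:Int)]).getD l.length 0 = 1 := by
    rw [List.getD_eq_getElem?_getD, List.getElem?_append_right (by omega)]
    simp
  rw [mulStep_len_eq (by rw [hget]; norm_num)]
  have := mul_loop_len_le (l ++ [1]) b l.length
  omega

theorem gf2_mul_bits {a b : List Int} (hb : BitsL b) : BitsL (gf2_mul a b) := by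
  rw [gf2_mul_eq_foldl]
  have : ∀ (js : List Nat) (acc : List Int), BitsL acc →
      BitsL (List.foldl (mulStep a b) acc js) := by
    intro js
    induction js with
    | nil => intro acc hacc; exact hacc
    | cons j js ih =>
      intro acc hacc
      rw [List.foldl_cons]
      apply ih
      unfold mulStep
      split_ifs with h
      · exact gf2_add_bits hacc (bitsL_append (bitsL_replicate j) hb)
      · exact hacc
  exact this _ [] bitsL_nil

-- ---- the consuming division pass as polynomial divisibility ----

theorem xorInto_bits : ∀ (t c : List Int), BitsL t → BitsL (xorInto t c) := by
  intro t
  induction t with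
  | nil => intro c _; cases c <;> exact bitsL_nil
  | cons x ts ih =>
    intro c ht
    cases c with
    | nil => exact ht
    | cons y cs =>
      exact bitsL_cons (bit_mod_two _) (ih cs (bitsL_of_cons ht))

theorem toP_reverse_cons (x : Int) (t : List Int) :
    toP ((x :: t).reverse) = toP t.reverse + Polynomial.C (x : ZMod 2) * Polynomial.X ^ t.length := by
  rw [List.reverse_cons, toP_append, List.length_reverse]
  simp [toP]
  ring

theorem xorInto_toP : ∀ (c t : List Int), c.length ≤ t.length →
    toP ((xorInto t c).reverse)
      = toP t.reverse + Polynomial.X ^ (t.length - c.length) * toP c.reverse := by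
  intro c
  induction c with
  | nil =>
    intro t _
    show toP ((xorInto t []).reverse) = _
    have : xorInto t [] = t := by cases t <;> rfl
    simp [this, toP]
  | cons y cs ih =>
    intro t hlen
    cases t with
    | nil => simp at hlen
    | cons x ts =>
      have hlen' : cs.length ≤ ts.length := by simpa using hlen
      show toP ((((x + y) % 2) :: xorInto ts cs).reverse) = _
      rw [toP_reverse_cons, toP_reverse_cons, toP_reverse_cons, xorInto_length]
      rw [ih ts hlen']
      have hx : (Polynomial.C (((x + y) % 2 : Int) : ZMod 2))
          = Polynomial.C (x : ZMod 2) + Polynomial.C (y : ZMod 2) := by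
        rw [intCast_mod_two]
        push_cast
        rw [map_add]
      rw [hx]
      have he : ts.length - cs.length + cs.length = ts.length := Nat.sub_add_cancel hlen'
      have hsub : (x :: ts).length - (y :: cs).length = ts.length - cs.length := by
        simp
      rw [hsub]
      calc toP ts.reverse + Polynomial.X ^ (ts.length - cs.length) * toP cs.reverse
            + (Polynomial.C (x : ZMod 2) + Polynomial.C (y : ZMod 2)) * Polynomial.X ^ ts.length
          = toP ts.reverse + Polynomial.C (x : ZMod 2) * Polynomial.X ^ ts.length
            + Polynomial.X ^ (ts.length - cs.length) * toP cs.reverse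
            + Polynomial.C (y : ZMod 2) * (Polynomial.X ^ (ts.length - cs.length)
                * Polynomial.X ^ cs.length) := by
            rw [← pow_add, he]; ring
        _ = toP ts.reverse + Polynomial.C (x : ZMod 2) * Polynomial.X ^ ts.length
            + Polynomial.X ^ (ts.length - cs.length)
              * (toP cs.reverse + Polynomial.C (y : ZMod 2) * Polynomial.X ^ cs.length) := by
            ring

theorem poly_add_self (p : Polynomial (ZMod 2)) : p + p = 0 := by
  have h2 : (2 : Polynomial (ZMod 2)) = Polynomial.C 2 := by
    rw [map_ofNat]
  have : p + p = 2 * p := (two_mul p).symm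
  rw [this, h2]
  have : (2 : ZMod 2) = 0 := by decide
  rw [this]
  simp

theorem divB_dvd : ∀ (s : Nat) (rem c : List Int), BitsL rem → BitsL c →
    rem.length = s + c.length →
    ((divB s rem c = true) ↔ toP (c.reverse ++ [1]) ∣ toP rem.reverse) := by
  intro s
  induction s with
  | zero =>
    intro rem c hrem hc hlen
    show (rem.all (fun x => x == 0) = true) ↔ _
    constructor
    · intro h
      have hz : toP rem.reverse = 0 := by
        rw [toP_eq_zero_bits _ (bitsL_reverse hrem)]
        simpa using h
      rw [hz]
      exact dvd_zero _
    · intro hdvd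
      have hmono := monic_toP_top c.reverse
      by_cases hz : toP rem.reverse = 0
      · rw [toP_eq_zero_bits _ (bitsL_reverse hrem)] at hz
        simpa using hz
      · exfalso
        have hle := Polynomial.degree_le_of_dvd hdvd hz
        have hdeg : (toP (c.reverse ++ [1])).degree = (c.length : Nat) := by
          rw [Polynomial.degree_eq_natDegree hmono.1.ne_zero, hmono.2, List.length_reverse]
        have hlt : (toP rem.reverse).degree < (c.length : Nat) := by
          have := toP_degree_lt rem.reverse
          rw [List.length_reverse, hlen] at this
          simpa using this
        rw [hdeg] at hle
        exact absurd (lt_of_le_of_lt hle hlt) (lt_irrefl _)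
  | succ s ih =>
    intro rem c hrem hc hlen
    cases rem with
    | nil => exact absurd hlen (by simp; omega)
    | cons x t =>
      have hlt : t.length = s + c.length := by simp at hlen; omega
      have hclet : c.length ≤ t.length := by omega
      rcases hrem x (List.mem_cons_self) with h0 | h1
      · subst h0
        show (divB (s+1) (0 :: t) c = true) ↔ _
        have : divB (s+1) (0 :: t) c = divB s t c := by
          show (if (0:Int) = 1 then _ else if (0:Int) = 0 then _ else false) = _
          norm_num
        rw [this, ih t c (bitsL_of_cons hrem) hc hlt]
        rw [toP_reverse_cons]
        simp
      · subst h1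
        show (divB (s+1) (1 :: t) c = true) ↔ _
        have hstep : divB (s+1) (1 :: t) c = divB s (xorInto t c) c := by
          show (if (1:Int) = 1 then _ else _) = _
          norm_num
        rw [hstep, ih (xorInto t c) c (xorInto_bits t c (bitsL_of_cons hrem)) hc
          (by rw [xorInto_length]; exact hlt)]
        have hold : toP ((xorInto t c).reverse)
              + Polynomial.X ^ s * toP (c.reverse ++ [1]) = toP ((1 :: t).reverse) := by
          rw [toP_reverse_cons, xorInto_toP c t hclet, toP_top, List.length_reverse]
          have hs : t.length - c.length = s := by omega
          rw [hs]
          have hcl : s + c.length = t.length := by omega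
          calc toP t.reverse + Polynomial.X ^ s * toP c.reverse
              + Polynomial.X ^ s * (toP c.reverse + Polynomial.X ^ c.length)
              = toP t.reverse + (Polynomial.X ^ s * toP c.reverse
                  + Polynomial.X ^ s * toP c.reverse)
                + Polynomial.X ^ (s + c.length) := by rw [pow_add]; ring
            _ = toP t.reverse + Polynomial.C ((1:Int) : ZMod 2) * Polynomial.X ^ t.length := by
                rw [poly_add_self, hcl]
                simp
        rw [← hold]
        constructor
        · intro h
          exact dvd_add h (dvd_mul_left _ _)
        · intro h
          have h2 : toP (c.reverse ++ [1]) ∣ Polynomial.X ^ s * toP (c.reverse ++ [1]) :=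
            dvd_mul_left _ _
          have := dvd_sub h h2
          simpa using this

-- ---- candidate enumeration: every bit list is some mask's bit list ----

theorem lowBits_length (m w : Nat) : (lowBits m w).length = w := by
  simp [lowBits]

theorem lowBits_succ (m w : Nat) :
    lowBits m (w + 1) = (((m &&& 1 : Nat) : Int)) :: lowBits (m >>> 1) w := by
  apply List.ext_getElem
  · simp [lowBits]
  · intro i h1 h2
    cases i with
    | zero => simp [lowBits]
    | succ j =>
      simp only [lowBits, List.getElem_map, List.getElem_range, List.getElem_cons_succ]
      congr 2
      rw [show j + 1 = 1 + j by omega, Nat.shiftRight_add]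

theorem bitsSurj : ∀ (w : Nat) (bs : List Int), BitsL bs → bs.length = w →
    ∃ m, m < 2 ^ w ∧ lowBits m w = bs := by
  intro w
  induction w with
  | zero =>
    intro bs _ hlen
    rcases List.eq_nil_of_length_eq_zero hlen with rfl
    exact ⟨0, by norm_num, rfl⟩
  | succ w ih =>
    intro bs hbs hlen
    cases bs with
    | nil => simp at hlen
    | cons x bt =>
      rcases ih bt (bitsL_of_cons hbs) (by simpa using hlen) with ⟨m', hm', hlb⟩
      refine ⟨x.toNat + 2 * m', ?_, ?_⟩
      · have hx : x.toNat ≤ 1 := by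
          rcases hbs x List.mem_cons_self with h | h <;> subst h <;> simp
        have := Nat.pow_succ 2 w
        omega
      · rw [lowBits_succ]
        have hand : (x.toNat + 2 * m') &&& 1 = x.toNat := by
          rw [Nat.and_one_is_mod]
          have hx : x.toNat ≤ 1 := by
            rcases hbs x List.mem_cons_self with h | h <;> subst h <;> simp
          omega
        have hshift : (x.toNat + 2 * m') >>> 1 = m' := by
          rw [Nat.shiftRight_one]
          have hx : x.toNat ≤ 1 := by
            rcases hbs x List.mem_cons_self with h | h <;> subst h <;> simp
          omega
        have hcast : ((x.toNat : Nat) : Int) = x := by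
          rcases hbs x List.mem_cons_self with h | h <;> subst h <;> simp
        rw [hand, hshift, hcast, hlb]

theorem maskBits_reverse (m d : Nat) : (maskBits m d).reverse = lowBits m d := by
  apply List.ext_getElem
  · rw [List.length_reverse, maskBits_length, lowBits_length]
  · intro i h1 h2
    have hd : i < d := by rwa [lowBits_length] at h2
    rw [List.getElem_reverse]
    have hlm : (maskBits m d).length = d := maskBits_length m d
    simp only [maskBits, lowBits, List.getElem_map, List.getElem_range, List.length_map,
      List.length_range]
    have he : d - 1 - (d - 1 - i) = i := by omega
    rw [he]

-- ---- per-candidate equivalence: trial division by g ⟺ some cofactor h multiplies back ----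

theorem bitsL_maskBits (m d : Nat) : BitsL (maskBits m d) := by
  have h := bitsL_reverse (bitsL_lowBits m d)
  rw [← maskBits_reverse, List.reverse_reverse] at h
  exact h

theorem zmod2_cases : ∀ (z : ZMod 2), z = 0 ∨ z = 1 := by decide

theorem inner_eq (t : List Int) (ht : BitsL t) (d gm : Nat) (hdle : d ≤ t.length) :
    divB (((1:Int) :: t).length - d) ((1:Int) :: t) (maskBits gm d)
      = (List.range (2 ^ (t.length - d))).any (fun hm =>
          gf2_mul (lowBits gm d ++ [1]) (lowBits hm (t.length - d) ++ [1])
            == ((1:Int) :: t).reverse) := by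
  have hfb : BitsL ((1:Int) :: t) := bitsL_cons (Or.inr rfl) ht
  have hgb : BitsL (lowBits gm d ++ [1]) :=
    bitsL_append (bitsL_lowBits gm d) (bitsL_cons (Or.inr rfl) bitsL_nil)
  have hfrev : ((1:Int) :: t).reverse = t.reverse ++ [1] := by simp
  have hfmono := monic_toP_top t.reverse
  have hgmono := monic_toP_top (lowBits gm d)
  have hGdeg : (toP (lowBits gm d ++ [1])).natDegree = d := by
    rw [hgmono.2, lowBits_length]
  have hFdeg : (toP (t.reverse ++ [1])).natDegree = t.length := by
    rw [hfmono.2, List.length_reverse]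
  rw [Bool.eq_iff_iff]
  rw [divB_dvd (((1:Int) :: t).length - d) ((1:Int) :: t) (maskBits gm d) hfb
    (bitsL_maskBits gm d) (by rw [maskBits_length, List.length_cons]; omega)]
  rw [maskBits_reverse, List.any_eq_true]
  constructor
  · intro hdvd
    rw [hfrev] at hdvd
    obtain ⟨q, hq⟩ := hdvd
    have hqmono : q.Monic := Polynomial.Monic.of_mul_monic_left hgmono.1 (hq ▸ hfmono.1)
    have hqdeg : q.natDegree = t.length - d := by
      have h1 : (toP (lowBits gm d ++ [1]) * q).natDegree
          = (toP (lowBits gm d ++ [1])).natDegree + q.natDegree :=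
        Polynomial.natDegree_mul hgmono.1.ne_zero hqmono.ne_zero
      rw [← hq, hFdeg, hGdeg] at h1
      omega
    have hbbits : BitsL ((List.range (t.length - d)).map
        (fun j => if q.coeff j = 1 then (1:Int) else 0)) := by
      intro y hy
      rcases List.mem_map.1 hy with ⟨j, _, rfl⟩
      split_ifs
      · right; rfl
      · left; rfl
    have hblen : ((List.range (t.length - d)).map
        (fun j => if q.coeff j = 1 then (1:Int) else 0)).length = t.length - d := by
      simp
    have htoPhb : toP (((List.range (t.length - d)).map
        (fun j => if q.coeff j = 1 then (1:Int) else 0)) ++ [1]) = q := by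
      apply Polynomial.ext
      intro j
      rw [toP_top, Polynomial.coeff_add, toP_coeff, Polynomial.coeff_X_pow, hblen]
      by_cases hjw : j < t.length - d
      · have hjl : j < ((List.range (t.length - d)).map
            (fun j => if q.coeff j = 1 then (1:Int) else 0)).length := by
          rw [hblen]; exact hjw
        rw [List.getD_eq_getElem?_getD, List.getElem?_eq_getElem hjl]
        rw [if_neg (by omega)]
        simp only [List.getElem_map, List.getElem_range, Option.getD_some]
        rcases zmod2_cases (q.coeff j) with h0 | h1
        · rw [h0, if_neg (by decide)]
          simp
        · rw [h1, if_pos rfl]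
          simp
      · rw [List.getD_eq_getElem?_getD, List.getElem?_eq_none (by rw [hblen]; omega)]
        by_cases hjeq : j = t.length - d
        · rw [if_pos hjeq]
          subst hjeq
          rw [← hqdeg, hqmono.coeff_natDegree]
          simp
        · rw [if_neg hjeq]
          have hz : q.coeff j = 0 :=
            Polynomial.coeff_eq_zero_of_natDegree_lt (by omega)
          rw [hz]
          simp
    obtain ⟨hm, hmlt, hlbs⟩ := bitsSurj (t.length - d) _ hbbits hblen
    refine ⟨hm, List.mem_range.2 hmlt, ?_⟩
    rw [beq_iff_eq, hlbs]
    apply toP_inj_bits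
    · exact gf2_mul_bits (bitsL_append hbbits (bitsL_cons (Or.inr rfl) bitsL_nil))
    · exact bitsL_reverse hfb
    · rw [gf2_mul_length _ _ (by simp), lowBits_length]
      simp only [List.length_append, List.length_cons, List.length_nil, List.length_reverse,
        hblen]
      omega
    · rw [gf2_mul_toP hgb, htoPhb, hfrev, hq]
  · rintro ⟨hm, _, heq⟩
    rw [beq_iff_eq] at heq
    refine ⟨toP (lowBits hm (t.length - d) ++ [1]), ?_⟩
    rw [← heq, gf2_mul_toP hgb]

-- bits are preserved by the leading-zero strip
theorem bitsL_stripZeros {l : List Int} (hl : BitsL l) : BitsL (stripZeros l) := by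
  have h := bitsL_dropWhile (p := fun x => decide (x = 0)) hl
  rwa [stripZeros_eq_dropWhile] at h

-- the two programs agree on genuine GF(2) polynomials (all coefficients 0/1)
theorem spec_of_bits (poly : List Int) (hpre : (poly.all (fun x => x == 0 || x == 1)) = true) :
    is_irreducible_polynomial poly = is_irreducible_polynomial_alt poly := by
  have hbits : BitsL poly := by
    intro x hx
    have h := (List.all_eq_true.1 hpre) x hx
    rcases Bool.or_eq_true_iff.1 h with h' | h'
    · left; exact eq_of_beq h'
    · right; exact eq_of_beq h'
  unfold is_irreducible_polynomial is_irreducible_polynomial_alt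
  rw [stripZeros_eq_dropWhile]
  rcases hs : stripZeros poly with _ | ⟨c, t⟩
  · simp
  · have hc := stripZeros_head_ne poly c t hs
    have hsb : BitsL (c :: t) := by
      have h := bitsL_stripZeros hbits
      rwa [hs] at h
    have hc1 : c = 1 := by
      rcases hsb c List.mem_cons_self with h0 | h1
      · exact absurd h0 hc
      · exact h1
    subst hc1
    rcases t with _ | ⟨c2, t2⟩
    · rw [if_pos (Or.inr (by simp)), if_pos (by simp)]
    · have hlen : ((1:Int) :: c2 :: t2).length = t2.length + 2 := by simp
      rw [if_neg (show ¬(((1:Int) :: c2 :: t2) = [] ∨ ((1:Int) :: c2 :: t2).length ≤ 1) by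
        push_neg; exact ⟨by simp, by simp⟩)]
      rw [if_neg (show ¬(((((1:Int) :: c2 :: t2).length : Int)) - 1 < 1) by
        rw [hlen]; push_cast; omega)]
      have hmain :
          (List.range' 1 ((((1:Int) :: c2 :: t2).length - 1) / 2)).any (fun d =>
            (generate_all_polynomials d).any (fun coeffs =>
              match polynomial_division_gf2 ((1:Int) :: c2 :: t2) (1 :: coeffs) with
              | none => false
              | some qr => decide (qr.2 = [0])))
          = (List.range' 1 ((((1:Int) :: c2 :: t2).length - 1) / 2)).any (fun d =>
              (List.range (2 ^ d)).any (fun gm =>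
                (List.range (2 ^ (((1:Int) :: c2 :: t2).length - 1 - d))).any (fun hm =>
                  gf2_mul (lowBits gm d ++ [1])
                    (lowBits hm (((1:Int) :: c2 :: t2).length - 1 - d) ++ [1])
                    == ((1:Int) :: c2 :: t2).reverse))) := by
        apply any_congr'
        intro d hd
        have hd' := List.mem_range'_1.1 hd
        have hd1 : 1 ≤ d := hd'.1
        have hd2 : d ≤ (((1:Int) :: c2 :: t2).length - 1) / 2 := by omega
        have hdn : d ≤ (c2 :: t2).length := by
          rw [hlen] at hd2
          simp only [List.length_cons]
          omega
        unfold generate_all_polynomials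
        rw [List.any_map]
        apply any_congr'
        intro gm hgm
        have hgm' : gm < 2 ^ d := List.mem_range.1 hgm
        show (match polynomial_division_gf2 ((1:Int) :: c2 :: t2)
              (1 :: zfillBits d (natToBin gm)) with
          | none => false
          | some qr => decide (qr.2 = [0])) = _
        rw [bits_eq d hd1 gm hgm']
        have hres := division_check_eq 1 (c2 :: t2) (maskBits gm d) (by norm_num)
          (by rw [maskBits_length]; exact hdn)
        rw [maskBits_length] at hres
        rw [hres]
        have hsub : ((1:Int) :: c2 :: t2).length - 1 - d = (c2 :: t2).length - d := by
          simp only [List.length_cons]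
          omega
        rw [hsub]
        exact inner_eq (c2 :: t2) (bitsL_of_cons hsb) d gm hdn
      rw [hmain]
      cases hval : (List.range' 1 ((((1:Int) :: c2 :: t2).length - 1) / 2)).any (fun d =>
              (List.range (2 ^ d)).any (fun gm =>
                (List.range (2 ^ (((1:Int) :: c2 :: t2).length - 1 - d))).any (fun hm =>
                  gf2_mul (lowBits gm d ++ [1])
                    (lowBits hm (((1:Int) :: c2 :: t2).length - 1 - d) ++ [1])
                    == ((1:Int) :: c2 :: t2).reverse))) <;> simp [hval]

theorem bitsD {l : List Int} (hl : BitsL l) (i : Nat) : l.getD i 0 = 0 ∨ l.getD i 0 = 1 := by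
  by_cases hi : i < l.length
  · rw [List.getD_eq_getElem?_getD, List.getElem?_eq_getElem hi]
    exact hl l[i] (List.getElem_mem hi)
  · rw [List.getD_eq_getElem?_getD, List.getElem?_eq_none (by omega)]
    left; rfl

-- the top coefficient of a product of two monic bit polynomials is 1
theorem prod_top_entry (lg lh : List Int) (hlg : BitsL lg) (hlh : BitsL lh) :
    (gf2_mul (lg ++ [1]) (lh ++ [1])).getD (lg.length + lh.length) 0 = 1 := by
  have hgm := monic_toP_top lg
  have hhm := monic_toP_top lh
  have hmul : toP (gf2_mul (lg ++ [1]) (lh ++ [1])) = toP (lg ++ [1]) * toP (lh ++ [1]) :=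
    gf2_mul_toP (bitsL_append hlg (bitsL_cons (Or.inr rfl) bitsL_nil)) _
  have hmono : (toP (lg ++ [1]) * toP (lh ++ [1])).Monic := hgm.1.mul hhm.1
  have hdeg : (toP (lg ++ [1]) * toP (lh ++ [1])).natDegree = lg.length + lh.length := by
    rw [Polynomial.natDegree_mul hgm.1.ne_zero hhm.1.ne_zero, hgm.2, hhm.2]
  have hco : (toP (gf2_mul (lg ++ [1]) (lh ++ [1]))).coeff (lg.length + lh.length) = 1 := by
    rw [hmul, ← hdeg, hmono.coeff_natDegree]
  rw [toP_coeff] at hco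
  have hpb : BitsL (gf2_mul (lg ++ [1]) (lh ++ [1])) :=
    gf2_mul_bits (bitsL_append hlh (bitsL_cons (Or.inr rfl) bitsL_nil))
  rcases bitsD hpb (lg.length + lh.length) with h0 | h1
  · rw [h0] at hco
    exact absurd hco (by decide)
  · exact h1

-- the last element of (c :: t).reverse, read with getD, is c
theorem rev_getD_head (c : Int) (t : List Int) : (c :: t).reverse.getD t.length 0 = c := by
  have hl : t.length < (c :: t).reverse.length := by simp
  rw [List.getD_eq_getElem?_getD, List.getElem?_eq_getElem hl]
  rw [List.getElem_reverse]
  simp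

-- the two programs agree whenever the stripped head is not 1: A finds no divisor (its division
-- can only cancel a leading 1) and B finds no factorisation (a product of monics is monic)
theorem spec_of_head_ne (poly : List Int)
    (hne : (poly.dropWhile (fun x => decide (x = 0))).headD 0 ≠ 1) :
    is_irreducible_polynomial poly = is_irreducible_polynomial_alt poly := by
  rw [stripZeros_eq_dropWhile] at hne
  unfold is_irreducible_polynomial is_irreducible_polynomial_alt
  rw [stripZeros_eq_dropWhile]
  rcases hs : stripZeros poly with _ | ⟨c, t⟩
  · simp
  · rw [hs] at hne
    have hc : c ≠ 0 := stripZeros_head_ne poly c t hs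
    have hc1 : c ≠ 1 := by simpa using hne
    rcases t with _ | ⟨c2, t2⟩
    · rw [if_pos (Or.inr (by simp)), if_pos (by simp)]
    · have hlen : (c :: c2 :: t2).length = t2.length + 2 := by simp
      rw [if_neg (show ¬((c :: c2 :: t2) = [] ∨ (c :: c2 :: t2).length ≤ 1) by
        push_neg; exact ⟨by simp, by simp⟩)]
      rw [if_neg (show ¬((((c :: c2 :: t2).length : Int)) - 1 < 1) by
        rw [hlen]; push_cast; omega)]
      have hA : (List.range' 1 (((c :: c2 :: t2).length - 1) / 2)).any (fun d =>
          (generate_all_polynomials d).any (fun coeffs =>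
            match polynomial_division_gf2 (c :: c2 :: t2) (1 :: coeffs) with
            | none => false
            | some qr => decide (qr.2 = [0]))) = false := by
        rw [List.any_eq_false]
        intro d hd
        have hd' := List.mem_range'_1.1 hd
        have hdn : d ≤ (c2 :: t2).length := by
          rw [hlen] at hd'
          simp only [List.length_cons]
          omega
        simp only [Bool.not_eq_true, List.any_eq_false]
        intro coeffs hcoeffs
        rcases List.mem_map.1 hcoeffs with ⟨gm, hgm, rfl⟩
        have hgm' : gm < 2 ^ d := List.mem_range.1 hgm
        rw [bits_eq d hd'.1 gm hgm']
        have hres := division_check_eq c (c2 :: t2) (maskBits gm d) hc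
          (by rw [maskBits_length]; exact hdn)
        rw [maskBits_length] at hres
        rw [hres]
        have hstep : (c :: c2 :: t2).length - d = ((c :: c2 :: t2).length - d - 1) + 1 := by
          rw [hlen]
          simp only [List.length_cons] at hdn
          omega
        rw [hstep]
        show divB _ (c :: c2 :: t2) _ = false
        rw [divB]
        rw [if_neg hc1, if_neg hc]
      have hB : (List.range' 1 (((c :: c2 :: t2).length - 1) / 2)).any (fun d =>
          (List.range (2 ^ d)).any (fun gm =>
            (List.range (2 ^ ((c :: c2 :: t2).length - 1 - d))).any (fun hm =>
              gf2_mul (lowBits gm d ++ [1])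
                (lowBits hm ((c :: c2 :: t2).length - 1 - d) ++ [1])
                == (c :: c2 :: t2).reverse))) = false := by
        rw [List.any_eq_false]
        intro d hd
        have hd' := List.mem_range'_1.1 hd
        have hdn : d ≤ (c2 :: t2).length := by
          rw [hlen] at hd'
          simp only [List.length_cons]
          omega
        simp only [Bool.not_eq_true, List.any_eq_false]
        intro gm _ hm _
        rw [beq_eq_false_iff_ne]
        intro heq
        have htop := prod_top_entry (lowBits gm d) (lowBits hm ((c :: c2 :: t2).length - 1 - d))
          (bitsL_lowBits _ _) (bitsL_lowBits _ _)
        rw [heq] at htop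
        rw [lowBits_length, lowBits_length] at htop
        have hidx : d + ((c :: c2 :: t2).length - 1 - d) = (c2 :: t2).length := by
          simp only [List.length_cons] at hdn ⊢
          omega
        rw [hidx, rev_getD_head] at htop
        exact hc1 htop
      rw [hA, hB]
      simp

-- ===== VERDICT (by name: the statement is the Claim_ definition above) =====
theorem is_irreducible_polynomial_spec : Claim_equal_is_irreducible_polynomial := by
  intro poly _ hpre
  unfold Spec_is_irreducible_polynomial
  rcases hpre with h | h
  · exact spec_of_head_ne poly h
  · exact spec_of_bits poly h
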